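-- pv_equiv track=rewrite | github.com/prudentprogrammer/Programming-Challenges-Solutions | uvaProblems/10050 Hartals.py | calculate_working_days
-- ===== SOURCE A (Python) =====
-- def calculate_working_days(days, hartal_number_for_parties):
--     # Pad 0th day for 1-1 index mapping
--     buffer = [False] + ([False] * (days))
--
--     for hartal in hartal_number_for_parties:
--         startPoint = hartal
--         # Stride by hartal days and for each of those days,
--         # mark the buffer as true.
--         while startPoint <= days:
--             buffer[startPoint] = True
--             startPoint += hartal
--
--     return sum(day and ind % 7 != 0 and ind % 7 != 6
--                 for ind, day in enumerate(buffer))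
-- ===== SOURCE B (Python) =====
-- def calculate_working_days(days, hartal_number_for_parties):
--     count = 0
--     for day in range(1, days + 1):
--         if day % 7 == 0 or day % 7 == 6:
--             continue
--         if any(day % h == 0 for h in hartal_number_for_parties):
--             count += 1
--     return count
-- ===== Notes on version B (the rewrite author's own statement) =====
-- stated objective: simpler
-- what changed: Replaces the boolean sieve buffer (strided marking per party, then an enumerate-and-sum pass) with a single counting loop over the days that tests divisibility against all parties directly.
import Mathlib
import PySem

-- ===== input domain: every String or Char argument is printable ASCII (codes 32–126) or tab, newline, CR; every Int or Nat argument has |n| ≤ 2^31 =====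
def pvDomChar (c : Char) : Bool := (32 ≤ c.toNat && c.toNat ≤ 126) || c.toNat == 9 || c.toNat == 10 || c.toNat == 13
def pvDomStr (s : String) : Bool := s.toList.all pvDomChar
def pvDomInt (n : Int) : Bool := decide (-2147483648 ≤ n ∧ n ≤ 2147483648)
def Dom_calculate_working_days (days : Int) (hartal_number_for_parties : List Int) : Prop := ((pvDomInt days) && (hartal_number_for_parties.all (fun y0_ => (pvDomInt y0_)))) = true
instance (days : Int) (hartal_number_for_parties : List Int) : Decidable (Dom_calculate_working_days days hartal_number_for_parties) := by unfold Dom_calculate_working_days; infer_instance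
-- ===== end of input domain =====

-- B replaces A's strided boolean sieve + enumerate/sum pass with one counting loop that
-- tests each day's divisibility against all parties (objective: simpler).

-- ===== PORT A =====
-- 'while startPoint <= days: buffer[startPoint] = True; startPoint += hartal'.
-- The mutable Python list is carried as an Array Bool (in-place set).
-- 'buffer[startPoint] = True' is exact for 0 ≤ startPoint, which holds whenever the loop
-- body runs on an input Pre_ admits (the loop is entered only with hartal ≥ 1 there).
-- The fuel days.toNat + 1 bounds the iteration count exactly on every input Pre_ admits
-- (each admitted hartal that enters the loop is ≥ 1, so at most days iterations run).
def pvMarkLoop (days hartal : Int) : Int → Array Bool → Nat → Array Bool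
  | _, buf, 0 => buf
  | s, buf, fuel+1 =>
    if s ≤ days then
      pvMarkLoop days hartal (s + hartal) (buf.setIfInBounds s.toNat true) fuel
    else buf

def calculate_working_days (days : Int) (hartal_number_for_parties : List Int) : Int :=
  -- buffer = [False] + [False] * days
  let buffer : Array Bool := (false :: List.replicate days.toNat false).toArray
  let buffer := hartal_number_for_parties.foldl
    (fun buf hartal => pvMarkLoop days hartal hartal buf (days.toNat + 1)) buffer
  -- sum(day and ind % 7 != 0 and ind % 7 != 6 for ind, day in enumerate(buffer));
  -- enumerate(buffer) = PySem.List.enumerate buffer.toList 0, written via zipIdx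
  -- (PySem.List.enumerate_eq_zipIdx_map) so that #eval is stack-safe on large buffers
  ((buffer.toList.zipIdx.map (fun p => ((p.2 : Int), p.1))).map (fun p =>
    if p.2 && decide (PySem.Int.mod p.1 7 ≠ 0) && decide (PySem.Int.mod p.1 7 ≠ 6)
    then (1:Int) else 0)).foldl (· + ·) 0  -- sum(...); .sum itself via List.sum_eq_foldl (stack-safe #eval)

-- ===== PORT B =====
-- range(1, days + 1) = PySem.List.pyRange 1 (days + 1) 1, written via List.range
-- (PySem.List.pyRange_one) so that #eval is stack-safe on large ranges
def calculate_working_days_alt (days : Int) (hartal_number_for_parties : List Int) : Int :=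
  ((List.range ((days + 1) - 1).toNat).map (fun k => 1 + (k : Int))).foldl
    (fun count day =>
      if PySem.Int.mod day 7 = 0 ∨ PySem.Int.mod day 7 = 6 then count
      else if hartal_number_for_parties.any (fun h => PySem.Int.mod day h == 0) then count + 1
      else count) 0

-- ===== PRECONDITION & SPEC =====
-- Pre_ is exactly the set of inputs on which A returns: a hartal h with h ≤ 0 and h ≤ days
-- makes A's while loop run forever (or die with IndexError once the index leaves the buffer).
def Pre_calculate_working_days (days : Int) (hartal_number_for_parties : List Int) : Prop :=
  ∀ h ∈ hartal_number_for_parties, 1 ≤ h ∨ days < h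
instance (days : Int) (hartal_number_for_parties : List Int) : Decidable (Pre_calculate_working_days days hartal_number_for_parties) := by unfold Pre_calculate_working_days; infer_instance

def pvWitness_calculate_working_days : Int × List Int := (14, [3, 4, 8])

def Spec_calculate_working_days (days : Int) (hartal_number_for_parties : List Int) (out : Int) : Prop := out = calculate_working_days_alt days hartal_number_for_parties
instance (days : Int) (hartal_number_for_parties : List Int) (out : Int) : Decidable (Spec_calculate_working_days days hartal_number_for_parties out) := by unfold Spec_calculate_working_days; infer_instance

-- ===== CLAIM (what is proved, stated in full; the proofs are below) =====
def Claim_equal_calculate_working_days : Prop := ∀ (days : Int) (hartal_number_for_parties : List Int), Dom_calculate_working_days days hartal_number_for_parties → Pre_calculate_working_days days hartal_number_for_parties → Spec_calculate_working_days days hartal_number_for_parties (calculate_working_days days hartal_number_for_parties)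

-- ===== LEMMAS AND PROOFS =====

-- List-level model of pvMarkLoop, used only by the proofs below.
def pvMarkLoopL (days hartal : Int) : Int → List Bool → Nat → List Bool
  | _, buf, 0 => buf
  | s, buf, fuel+1 =>
    if s ≤ days then
      pvMarkLoopL days hartal (s + hartal) (PySem.List.pySetD buf s true) fuel
    else buf

theorem pvMarkLoop_toList (days hartal : Int) (fuel : Nat) (s : Int) (hs0 : 0 ≤ s)
    (hpos : 0 < hartal ∨ days < s) (buf : Array Bool) :
    (pvMarkLoop days hartal s buf fuel).toList = pvMarkLoopL days hartal s buf.toList fuel := by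
  induction fuel generalizing s buf with
  | zero => rfl
  | succ n ih =>
    simp only [pvMarkLoop, pvMarkLoopL]
    split
    · rename_i hsd
      have hpos' : 0 < hartal := by
        rcases hpos with h | h
        · exact h
        · omega
      rw [ih (s + hartal) (by omega) (Or.inl hpos')]
      rw [PySem.List.pySetD_of_nonneg _ _ hs0, Array.toList_setIfInBounds]
    · rfl

theorem pvMarkLoopL_skip (days hartal s : Int) (buf : List Bool) (fuel : Nat)
    (h : days < s) : pvMarkLoopL days hartal s buf fuel = buf := by
  cases fuel <;> simp [pvMarkLoopL, not_le.mpr h]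

theorem pvMarkLoop_skipA (days hartal s : Int) (buf : Array Bool) (fuel : Nat)
    (h : days < s) : pvMarkLoop days hartal s buf fuel = buf := by
  cases fuel <;> simp [pvMarkLoop, not_le.mpr h]

theorem pvFold_toList (days : Int) (hs : List Int)
    (hp : ∀ h ∈ hs, 1 ≤ h ∨ days < h) (buf : Array Bool) :
    (hs.foldl (fun buf h => pvMarkLoop days h h buf (days.toNat + 1)) buf).toList
      = hs.foldl (fun buf h => pvMarkLoopL days h h buf (days.toNat + 1)) buf.toList := by
  induction hs generalizing buf with
  | nil => rfl
  | cons h t ih =>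
    have hph := hp h (List.mem_cons_self ..)
    have hpt : ∀ x ∈ t, 1 ≤ x ∨ days < x := fun x hx => hp x (List.mem_cons_of_mem _ hx)
    simp only [List.foldl_cons]
    by_cases hh : 1 ≤ h
    · rw [ih hpt, pvMarkLoop_toList days h _ h (by omega) (Or.inl (by omega))]
    · have hdl : days < h := hph.resolve_left hh
      rw [ih hpt, pvMarkLoop_skipA _ _ _ _ _ hdl, pvMarkLoopL_skip _ _ _ _ _ hdl]

theorem pvMarkLoopL_length (days hartal : Int) (s : Int) (buf : List Bool) (fuel : Nat) :
    (pvMarkLoopL days hartal s buf fuel).length = buf.length := by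
  induction fuel generalizing s buf with
  | zero => rfl
  | succ n ih =>
    simp only [pvMarkLoopL]
    split
    · rw [ih]; exact PySem.List.length_pySetD _ _ _
    · rfl

theorem pvMarkLoopL_getD (days hartal : Int) (h1 : 1 ≤ hartal) (fuel : Nat) (s : Int)
    (hs1 : 1 ≤ s) (buf : List Bool) (hfuel : days - s < (fuel : Int) * hartal) (j : Nat) :
    (pvMarkLoopL days hartal s buf fuel).getD j false
      = (buf.getD j false ||
         decide (s ≤ (j:Int) ∧ (j:Int) ≤ days ∧ hartal ∣ ((j:Int) - s) ∧ j < buf.length)) := by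
  induction fuel generalizing s buf with
  | zero =>
    have hds : days < s := by simpa using hfuel
    have hno : ¬ (s ≤ (j:Int) ∧ (j:Int) ≤ days ∧ hartal ∣ ((j:Int) - s) ∧ j < buf.length) := by
      rintro ⟨ha, hb, -, -⟩; omega
    simp [pvMarkLoopL, hno]
  | succ n ih =>
    by_cases hsd : s ≤ days
    · have hexp : ((n : Int) + 1) * hartal = (n : Int) * hartal + hartal := by ring
      have hfuel2 : days - s < ((n : Int) + 1) * hartal := by push_cast at hfuel; exact hfuel
      have hfuel' : days - (s + hartal) < (n : Int) * hartal := by omega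
      simp only [pvMarkLoopL, if_pos hsd]
      rw [ih (s + hartal) (by omega) _ hfuel']
      rw [PySem.List.pySetD_of_nonneg buf true (by omega)]
      simp only [List.length_set]
      by_cases hj : j = s.toNat
      · have hjs : (j : Int) = s := by omega
        have hnol : ¬ (s + hartal ≤ (j:Int) ∧ (j:Int) ≤ days ∧ hartal ∣ (j:Int) - (s + hartal) ∧ j < buf.length) := by
          rintro ⟨ha, -, -, -⟩; omega
        rw [decide_eq_false hnol]
        by_cases hlt : j < buf.length
        · have hset : (buf.set s.toNat true).getD j false = true := by
            subst hj
            simp [List.getD_eq_getElem?_getD, hlt]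
          have hc2 : decide (s ≤ (j:Int) ∧ (j:Int) ≤ days ∧ hartal ∣ (j:Int) - s ∧ j < buf.length) = true := by
            simp only [decide_eq_true_eq]
            exact ⟨by omega, by omega, by simp [hjs], hlt⟩
          rw [hset, hc2]
          simp
        · have hnone : (buf.set s.toNat true)[j]? = none := by
            rw [List.getElem?_eq_none_iff]
            simp only [List.length_set]
            omega
          have hset : (buf.set s.toNat true).getD j false = false := by
            simp [List.getD_eq_getElem?_getD, hnone]
          have hg : buf.getD j false = false := by
            simp [List.getD_eq_getElem?_getD, List.getElem?_eq_none_iff.mpr (by omega : buf.length ≤ j)]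
          have hc2 : decide (s ≤ (j:Int) ∧ (j:Int) ≤ days ∧ hartal ∣ (j:Int) - s ∧ j < buf.length) = false := by
            apply decide_eq_false
            rintro ⟨-, -, -, hl⟩
            omega
          rw [hset, hg, hc2]
      · have hjs : (j : Int) ≠ s := by omega
        have hset : (buf.set s.toNat true).getD j false = buf.getD j false := by
          simp [List.getD_eq_getElem?_getD, Ne.symm hj]
        rw [hset]
        congr 1
        rw [decide_eq_decide]
        constructor
        · rintro ⟨ha, hb, hd, hl⟩
          refine ⟨by omega, hb, ?_, hl⟩
          have := dvd_add hd (dvd_refl hartal)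
          simpa [sub_add_cancel, show (j:Int) - (s + hartal) + hartal = (j:Int) - s by ring] using this
        · rintro ⟨ha, hb, hd, hl⟩
          have hpos : 0 < (j:Int) - s := by omega
          have hle : hartal ≤ (j:Int) - s := Int.le_of_dvd hpos hd
          refine ⟨by omega, hb, ?_, hl⟩
          have := dvd_sub hd (dvd_refl hartal)
          simpa [show (j:Int) - s - hartal = (j:Int) - (s + hartal) by ring] using this
    · have hno : ¬ (s ≤ (j:Int) ∧ (j:Int) ≤ days ∧ hartal ∣ ((j:Int) - s) ∧ j < buf.length) := by
        rintro ⟨ha, hb, -, -⟩; omega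
      simp [pvMarkLoopL, hsd, hno]

theorem pvFold_length (days : Int) (hs : List Int) (buf : List Bool) :
    (hs.foldl (fun buf h => pvMarkLoopL days h h buf (days.toNat + 1)) buf).length = buf.length := by
  induction hs generalizing buf with
  | nil => rfl
  | cons h t ih => simp only [List.foldl_cons]; rw [ih, pvMarkLoopL_length]

theorem pvFold_getD (days : Int) (hs : List Int)
    (hp : ∀ h ∈ hs, 1 ≤ h ∨ days < h) (buf : List Bool) (j : Nat) :
    ((hs.foldl (fun buf h => pvMarkLoopL days h h buf (days.toNat + 1)) buf).getD j false)
      = (buf.getD j false ||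
         decide (∃ h ∈ hs, 1 ≤ h ∧ h ≤ (j:Int) ∧ (j:Int) ≤ days ∧ h ∣ (j:Int) ∧ j < buf.length)) := by
  induction hs generalizing buf with
  | nil => simp
  | cons h t ih =>
    have hph := hp h (List.mem_cons_self ..)
    have hpt : ∀ x ∈ t, 1 ≤ x ∨ days < x := fun x hx => hp x (List.mem_cons_of_mem _ hx)
    simp only [List.foldl_cons]
    rw [ih hpt, pvMarkLoopL_length]
    by_cases hh : 1 ≤ h
    · have hA : ((days.toNat : Int) + 1) * 1 ≤ ((days.toNat : Int) + 1) * h :=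
        mul_le_mul_of_nonneg_left hh (by positivity)
      have hB : days ≤ (days.toNat : Int) := Int.self_le_toNat days
      have hfl : days - h < ((days.toNat + 1 : Nat) : Int) * h := by push_cast; linarith
      rw [pvMarkLoopL_getD days h hh _ h hh buf hfl j, Bool.or_assoc, ← Bool.decide_or]
      congr 1
      rw [decide_eq_decide]
      constructor
      · rintro (⟨ha, hb, hd, hl⟩ | ⟨h', ht', r⟩)
        · refine ⟨h, List.mem_cons_self .., hh, ha, hb, ?_, hl⟩
          have := dvd_add hd (dvd_refl h)
          simpa [show (j:Int) - h + h = (j:Int) by ring] using this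
        · exact ⟨h', List.mem_cons_of_mem _ ht', r⟩
      · rintro ⟨h', hmem, h1', ha, hb, hd, hl⟩
        rcases List.mem_cons.mp hmem with rfl | hmt
        · exact Or.inl ⟨ha, hb, dvd_sub hd (dvd_refl h'), hl⟩
        · exact Or.inr ⟨h', hmt, h1', ha, hb, hd, hl⟩
    · have hdl : days < h := hph.resolve_left hh
      rw [pvMarkLoopL_skip _ _ _ _ _ hdl]
      congr 1
      rw [decide_eq_decide]
      constructor
      · rintro ⟨h', ht', r⟩
        exact ⟨h', List.mem_cons_of_mem _ ht', r⟩
      · rintro ⟨h', hmem, h1', r⟩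
        rcases List.mem_cons.mp hmem with rfl | hmt
        · exact absurd h1' hh
        · exact ⟨h', hmt, h1', r⟩

theorem pvB0_getD (n k : Nat) : (false :: List.replicate n false).getD k false = false := by
  cases k with
  | zero => rfl
  | succ m => by_cases h : m < n <;> simp [List.getD_eq_getElem?_getD, h]

theorem pvA_eq_countP (days : Int) (hs : List Int)
    (hp : ∀ h ∈ hs, 1 ≤ h ∨ days < h) :
    calculate_working_days days hs
      = ((PySem.List.pyRange 0 (((days.toNat + 1 : Nat) : Int)) 1).countP (fun j =>
          ((hs.foldl (fun buf h => pvMarkLoopL days h h buf (days.toNat + 1))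
              (false :: List.replicate days.toNat false)).getD j.toNat false
            && decide (PySem.Int.mod j 7 ≠ 0) && decide (PySem.Int.mod j 7 ≠ 6))) : Int) := by
  simp only [calculate_working_days]
  rw [← List.sum_eq_foldl]
  rw [pvFold_toList days hs hp, List.toList_toArray]
  rw [show ∀ (xs : List Bool), xs.zipIdx.map (fun p => ((p.2 : Int), p.1))
        = PySem.List.enumerate xs 0 from fun xs => by
      rw [PySem.List.enumerate_eq_zipIdx_map]; simp]
  rw [PySem.List.enumerate_eq_map_pyRange _ false, List.map_map]
  rw [PySem.List.len_eq, pvFold_length]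
  simp only [List.length_cons, List.length_replicate, Function.comp_def]
  rw [PySem.List.sum_map_ite_one_zero]
  congr 1
  apply List.countP_congr
  intro j hj
  obtain ⟨hj0, -⟩ := PySem.List.mem_pyRange_one.mp hj
  rw [PySem.List.pyGetD_of_nonneg _ _ hj0]

theorem pvRangeMap_eq_pyRange (a b : Int) :
    (List.range (b - a).toNat).map (fun k => a + (k : Int)) = PySem.List.pyRange a b 1 := by
  rw [PySem.List.pyRange_one]
  generalize List.range (b - a).toNat = l
  induction l with
  | nil => rfl
  | cons x xs ih => simp_all

theorem pvB_eq_countP (days : Int) (hs : List Int) :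
    calculate_working_days_alt days hs
      = ((PySem.List.pyRange 1 (days + 1) 1).countP (fun day =>
          (!decide (PySem.Int.mod day 7 = 0 ∨ PySem.Int.mod day 7 = 6)
            && hs.any (fun h => PySem.Int.mod day h == 0))) : Int) := by
  simp only [calculate_working_days_alt]
  rw [pvRangeMap_eq_pyRange 1 (days + 1)]
  have hstep : (fun (c : Int) day =>
        if PySem.Int.mod day 7 = 0 ∨ PySem.Int.mod day 7 = 6 then c
        else if hs.any (fun h => PySem.Int.mod day h == 0) then c + 1 else c)
      = (fun (c : Int) day =>
          if (!decide (PySem.Int.mod day 7 = 0 ∨ PySem.Int.mod day 7 = 6)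
              && hs.any (fun h => PySem.Int.mod day h == 0)) = true then c + 1 else c) := by
    funext c day
    by_cases h1 : PySem.Int.mod day 7 = 0 ∨ PySem.Int.mod day 7 = 6
    · rw [if_pos h1, decide_eq_true h1]
      simp
    · rw [if_neg h1, decide_eq_false h1]
      by_cases h2 : hs.any (fun h => PySem.Int.mod day h == 0) = true
      · rw [if_pos h2]
        simp [h2]
      · rw [if_neg h2]
        have h2' : hs.any (fun h => PySem.Int.mod day h == 0) = false := by
          simpa using h2
        simp [h2']
  rw [hstep, PySem.List.foldl_if_add_one]
  ring

-- ===== VERDICT (by name: the statement is the Claim_ definition above) =====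
theorem calculate_working_days_spec : Claim_equal_calculate_working_days := by
  intro days hs _ hpre
  unfold Spec_calculate_working_days
  rw [pvA_eq_countP days hs hpre, pvB_eq_countP]
  by_cases hdpos : 0 ≤ days
  · rw [show (((days.toNat + 1 : Nat) : Int)) = days + 1 by omega]
    rw [PySem.List.pyRange_one_cons (by omega : (0 : Int) < days + 1)]
    rw [List.countP_cons]
    have hzero : ¬ (PySem.Int.mod (0:Int) 7 ≠ 0) := by decide
    simp only [hzero, decide_false, Bool.and_false, Bool.false_and,
      show (0 : Int) + 1 = 1 by ring]
    congr 1
    apply List.countP_congr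
    intro d hd
    obtain ⟨hd1, hd2⟩ := PySem.List.mem_pyRange_one.mp hd
    have hcast : ((d.toNat : Nat) : Int) = d := by omega
    rw [pvFold_getD days hs hpre _ d.toNat, pvB0_getD]
    simp only [List.length_cons, List.length_replicate, hcast, Bool.false_or]
    simp only [Bool.and_eq_true, decide_eq_true_eq, List.any_eq_true, beq_iff_eq,
      Bool.not_eq_eq_eq_not, Bool.not_true, decide_eq_false_iff_not,
      PySem.Int.mod_eq_zero_iff_dvd]
    constructor
    · rintro ⟨⟨⟨h, hm, -, -, -, hdvd, -⟩, hw1⟩, hw2⟩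
      refine ⟨?_, ⟨h, hm, hdvd⟩⟩
      rintro (h7 | h6)
      · exact hw1 ((PySem.Int.mod_eq_zero_iff_dvd d 7).mpr h7)
      · exact hw2 h6
    · rintro ⟨hw, h, hm, hdvd⟩
      have hh1 : 1 ≤ h := by rcases hpre h hm with h' | h' <;> omega
      have hw1 : PySem.Int.mod d 7 ≠ 0 := fun he =>
        hw (Or.inl ((PySem.Int.mod_eq_zero_iff_dvd d 7).mp he))
      have hw2 : PySem.Int.mod d 7 ≠ 6 := fun he => hw (Or.inr he)
      exact ⟨⟨⟨h, hm, hh1, Int.le_of_dvd (by omega) hdvd, by omega, hdvd, by omega⟩, hw1⟩, hw2⟩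
  · rw [show (((days.toNat + 1 : Nat) : Int)) = 1 by omega]
    rw [PySem.List.pyRange_one_cons (by norm_num : (0 : Int) < 1),
        PySem.List.pyRange_one_eq_nil (by norm_num : (1 : Int) ≤ 0 + 1),
        PySem.List.pyRange_one_eq_nil (by omega : days + 1 ≤ 1)]
    simp
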